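-- pv_equiv track=rewrite | github.com/mengxia-mx/LSTM-LM | data_load.py | data_iterator
-- ===== SOURCE A (Python) =====
-- def data_iterator(raw_data, batch_size, num_steps):
--     data_len = len(raw_data)
--     batch_len = data_len // batch_size
--     data = []
--     for i in range(batch_size):
--         x = raw_data[batch_len * i:batch_len * (i + 1)]
--         data.append(x)
--
--     epoch_size = (batch_len - 1) // num_steps
--
--     if epoch_size == 0:
--         raise ValueError("epoch_size == 0, decrease batch_size or num_steps")
--
--     for i in range(epoch_size):
--         xs = list()
--         ys = list()
--         for j in range(batch_size):
--             x = data[j][i * num_steps:(i + 1) * num_steps]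
--             y = data[j][i * num_steps + 1:(i + 1) * num_steps + 1]
--             xs.append(x)
--             ys.append(y)
--         yield (xs, ys)
-- ===== SOURCE B (Python) =====
-- def data_iterator(raw_data, batch_size, num_steps):
--     batch_len = len(raw_data) // batch_size
--     epoch_size = (batch_len - 1) // num_steps
--     if epoch_size == 0:
--         raise ValueError("epoch_size == 0, decrease batch_size or num_steps")
--     # batch-major precomputation: for each batch row, its whole window
--     # sequence at once; the epoch loop is then a pure transpose.
--     xcols = []
--     ycols = []
--     for j in range(batch_size):
--         row = raw_data[batch_len * j:batch_len * (j + 1)]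
--         xcols.append([row[i * num_steps:(i + 1) * num_steps] for i in range(epoch_size)])
--         ycols.append([row[i * num_steps + 1:(i + 1) * num_steps + 1] for i in range(epoch_size)])
--     for i in range(epoch_size):
--         yield ([c[i] for c in xcols], [c[i] for c in ycols])
-- ===== Notes on version B (the rewrite author's own statement) =====
-- stated objective: alternative
-- what changed: Swaps the traversal order: instead of A's epoch-major loop that slices windows out of a materialised row table on demand, B precomputes each batch row's complete x/y window sequences in one batch-major pass and then emits each epoch by transposing (picking column i of every row's sequence).
import Mathlib
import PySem

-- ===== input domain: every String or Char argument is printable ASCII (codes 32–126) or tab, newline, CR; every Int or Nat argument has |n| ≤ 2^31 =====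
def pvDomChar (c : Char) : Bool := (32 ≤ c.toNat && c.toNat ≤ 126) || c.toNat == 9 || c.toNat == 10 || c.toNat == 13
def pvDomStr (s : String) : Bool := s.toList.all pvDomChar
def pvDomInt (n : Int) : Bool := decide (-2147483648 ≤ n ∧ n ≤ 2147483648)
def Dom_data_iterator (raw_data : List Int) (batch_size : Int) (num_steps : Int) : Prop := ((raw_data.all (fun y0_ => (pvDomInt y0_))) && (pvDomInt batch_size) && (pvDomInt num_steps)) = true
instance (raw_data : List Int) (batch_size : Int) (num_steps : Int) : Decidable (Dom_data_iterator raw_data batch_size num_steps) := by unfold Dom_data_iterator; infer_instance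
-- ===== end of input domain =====

-- B swaps the traversal order: a batch-major pass precomputes each row's whole x/y window
-- sequences and the epoch loop becomes a pure transpose (alternative decomposition, same cost).


-- ===== PORT A =====
-- append loops ('out.append(x)') are accumulated by cons and reversed at the end —
-- same elements in the same order, evaluable in linear time (bridged by pv_foldl_cons_reverse_eq_map)
def data_iterator (raw_data : List Int) (batch_size : Int) (num_steps : Int) : List (List (List Int) × List (List Int)) :=
  let data_len : Int := (raw_data.length : Int)
  let batch_len : Int := PySem.Int.floordiv data_len batch_size
  let data : List (List Int) :=
    ((PySem.List.pyRange 0 batch_size 1).foldl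
      (fun acc i =>
        PySem.List.slice raw_data (some (batch_len * i)) (some (batch_len * (i + 1))) :: acc) []).reverse
  let epoch_size : Int := PySem.Int.floordiv (batch_len - 1) num_steps
  -- Python raises ValueError iff epoch_size = 0: excluded by Pre_data_iterator
  ((PySem.List.pyRange 0 epoch_size 1).foldl
    (fun out i =>
      let p :=
        (PySem.List.pyRange 0 batch_size 1).foldl
          (fun (p : List (List Int) × List (List Int)) j =>
            -- data[j]: j is always in range here, so pyGetD's default is never used
            (PySem.List.slice (PySem.List.pyGetD data j [])
                (some (i * num_steps)) (some ((i + 1) * num_steps)) :: p.1,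
             PySem.List.slice (PySem.List.pyGetD data j [])
                (some (i * num_steps + 1)) (some ((i + 1) * num_steps + 1)) :: p.2))
          ([], [])
      (p.1.reverse, p.2.reverse) :: out) []).reverse

-- ===== PORT B =====
def data_iterator_alt (raw_data : List Int) (batch_size : Int) (num_steps : Int) : List (List (List Int) × List (List Int)) :=
  let batch_len : Int := PySem.Int.floordiv (raw_data.length : Int) batch_size
  let epoch_size : Int := PySem.Int.floordiv (batch_len - 1) num_steps
  -- batch-major pass: each row's complete x/y window sequences (appends as cons+reverse)
  let cols : List (List (List Int)) × List (List (List Int)) :=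
    (PySem.List.pyRange 0 batch_size 1).foldl
      (fun (cs : List (List (List Int)) × List (List (List Int))) j =>
        let row := PySem.List.slice raw_data (some (batch_len * j)) (some (batch_len * (j + 1)))
        ((PySem.List.pyRange 0 epoch_size 1).map
            (fun i => PySem.List.slice row (some (i * num_steps)) (some ((i + 1) * num_steps))) :: cs.1,
         (PySem.List.pyRange 0 epoch_size 1).map
            (fun i => PySem.List.slice row (some (i * num_steps + 1)) (some ((i + 1) * num_steps + 1))) :: cs.2))
      ([], [])
  let xcols := cols.1.reverse
  let ycols := cols.2.reverse
  -- epoch loop: transpose (column i of every row's sequence; i is always in range)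
  (PySem.List.pyRange 0 epoch_size 1).map
    (fun i => (xcols.map (fun c => PySem.List.pyGetD c i []),
               ycols.map (fun c => PySem.List.pyGetD c i [])))

-- ===== PRECONDITION & SPEC =====
-- Pre_ excludes exactly the inputs where A raises: zero batch_size or num_steps
-- (ZeroDivisionError) and epoch_size = 0 (the explicit ValueError).
def Pre_data_iterator (raw_data : List Int) (batch_size : Int) (num_steps : Int) : Prop :=
  batch_size ≠ 0 ∧ num_steps ≠ 0 ∧
  PySem.Int.floordiv (PySem.Int.floordiv (raw_data.length : Int) batch_size - 1) num_steps ≠ 0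
instance (raw_data : List Int) (batch_size : Int) (num_steps : Int) : Decidable (Pre_data_iterator raw_data batch_size num_steps) := by unfold Pre_data_iterator; infer_instance

def pvWitness_data_iterator : List Int × Int × Int := ([1, 2, 3, 4], 2, 1)

def Spec_data_iterator (raw_data : List Int) (batch_size : Int) (num_steps : Int) (out : List (List (List Int) × List (List Int))) : Prop := out = data_iterator_alt raw_data batch_size num_steps
instance (raw_data : List Int) (batch_size : Int) (num_steps : Int) (out : List (List (List Int) × List (List Int))) : Decidable (Spec_data_iterator raw_data batch_size num_steps out) := by unfold Spec_data_iterator; infer_instance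

-- ===== CLAIM (what is proved, stated in full; the proofs are below) =====
def Claim_equal_data_iterator : Prop := ∀ (raw_data : List Int) (batch_size : Int) (num_steps : Int), Dom_data_iterator raw_data batch_size num_steps → Pre_data_iterator raw_data batch_size num_steps → Spec_data_iterator raw_data batch_size num_steps (data_iterator raw_data batch_size num_steps)

-- ===== LEMMAS AND PROOFS =====

-- a cons-accumulated loop reversed at the end is the map over the loop's range
lemma pv_foldl_cons_reverse_eq_map {A B : Type} (f : A → B) (l : List A) :
    (l.foldl (fun acc x => f x :: acc) []).reverse = l.map f := by
  suffices h : ∀ acc : List B, l.foldl (fun acc x => f x :: acc) acc = (l.map f).reverse ++ acc by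
    rw [h]; simp
  induction l with
  | nil => intro acc; simp
  | cons x xs ih => intro acc; simp [List.foldl, ih]

-- the common canonical form: epoch-indexed map of batch-indexed maps of windows
def pvCanon (raw : List Int) (bs ns : Int) : List (List (List Int) × List (List Int)) :=
  let bl : Int := PySem.Int.floordiv (raw.length : Int) bs
  let ep : Int := PySem.Int.floordiv (bl - 1) ns
  (PySem.List.pyRange 0 ep 1).map (fun i =>
    ((PySem.List.pyRange 0 bs 1).map (fun j =>
        PySem.List.slice (PySem.List.slice raw (some (bl * j)) (some (bl * (j + 1))))
          (some (i * ns)) (some ((i + 1) * ns))),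
     (PySem.List.pyRange 0 bs 1).map (fun j =>
        PySem.List.slice (PySem.List.slice raw (some (bl * j)) (some (bl * (j + 1))))
          (some (i * ns + 1)) (some ((i + 1) * ns + 1)))))

lemma a_eq_canon (raw : List Int) (bs ns : Int) :
    data_iterator raw bs ns = pvCanon raw bs ns := by
  simp only [data_iterator, pvCanon]
  set bl := PySem.Int.floordiv (raw.length : Int) bs with hbl
  set ep := PySem.Int.floordiv (bl - 1) ns with hep
  rw [pv_foldl_cons_reverse_eq_map (f := fun i =>
        PySem.List.slice raw (some (bl * i)) (some (bl * (i + 1)))),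
      pv_foldl_cons_reverse_eq_map]
  refine List.map_congr_left ?_
  intro i hi
  rw [PySem.List.foldl_prod_mk
        (f := fun (acc : List (List Int)) j =>
          PySem.List.slice
            (PySem.List.pyGetD ((PySem.List.pyRange 0 bs 1).map
              (fun i => PySem.List.slice raw (some (bl * i)) (some (bl * (i + 1))))) j [])
            (some (i * ns)) (some ((i + 1) * ns)) :: acc)
        (g := fun (acc : List (List Int)) j =>
          PySem.List.slice
            (PySem.List.pyGetD ((PySem.List.pyRange 0 bs 1).map
              (fun i => PySem.List.slice raw (some (bl * i)) (some (bl * (i + 1))))) j [])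
            (some (i * ns + 1)) (some ((i + 1) * ns + 1)) :: acc)]
  rw [pv_foldl_cons_reverse_eq_map, pv_foldl_cons_reverse_eq_map]
  refine Prod.ext ?_ ?_ <;>
  · refine List.map_congr_left ?_
    intro j hj
    rw [PySem.List.mem_pyRange_one] at hj
    rw [PySem.List.pyGetD_map_pyRange_of_nonneg _ _ _ _ hj.1 hj.2]

lemma b_eq_canon (raw : List Int) (bs ns : Int) :
    data_iterator_alt raw bs ns = pvCanon raw bs ns := by
  simp only [data_iterator_alt, pvCanon]
  set bl := PySem.Int.floordiv (raw.length : Int) bs with hbl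
  set ep := PySem.Int.floordiv (bl - 1) ns with hep
  rw [PySem.List.foldl_prod_mk
        (f := fun (acc : List (List (List Int))) j =>
          (PySem.List.pyRange 0 ep 1).map
            (fun i => PySem.List.slice
              (PySem.List.slice raw (some (bl * j)) (some (bl * (j + 1))))
              (some (i * ns)) (some ((i + 1) * ns))) :: acc)
        (g := fun (acc : List (List (List Int))) j =>
          (PySem.List.pyRange 0 ep 1).map
            (fun i => PySem.List.slice
              (PySem.List.slice raw (some (bl * j)) (some (bl * (j + 1))))
              (some (i * ns + 1)) (some ((i + 1) * ns + 1))) :: acc)]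
  rw [pv_foldl_cons_reverse_eq_map, pv_foldl_cons_reverse_eq_map]
  refine List.map_congr_left ?_
  intro i hi
  rw [PySem.List.mem_pyRange_one] at hi
  rw [List.map_map, List.map_map]
  refine Prod.ext ?_ ?_ <;>
  · refine List.map_congr_left ?_
    intro j hj
    simp only [Function.comp]
    rw [PySem.List.pyGetD_map_pyRange_of_nonneg _ _ _ _ hi.1 hi.2]

-- ===== VERDICT (by name: the statement is the Claim_ definition above) =====
theorem data_iterator_spec : Claim_equal_data_iterator := by
  intro raw bs ns _ _
  unfold Spec_data_iterator
  rw [a_eq_canon, b_eq_canon]
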